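-- pv_equiv track=rewrite | github.com/FeRulo/random-music | random-penta.py | crear_armadura
-- ===== SOURCE A (Python) =====
-- VACIO = list("- - - - -")
--
-- def añadir_espacios(espacios,basico):
--     return list(' '*espacios) + basico + list(' '*espacios)
--
-- def crear_armadura(posiciones,figura,espacios):
--     armaduras = []
--     for i in range(0,len(posiciones)):
--         armadura=[]
--         for j in range(0,i+1):
--             new = VACIO.copy()
--             new[posiciones[j]]= figura
--             armadura.append(añadir_espacios(espacios,new))
--         armadura.append(añadir_espacios(espacios,VACIO))
--         armaduras.append(armadura)
--     return armaduras
-- ===== SOURCE B (Python) =====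
-- VACIO = list("- - - - -")
--
-- def añadir_espacios(espacios, basico):
--     return list(' '*espacios) + basico + list(' '*espacios)
--
-- def crear_armadura(posiciones, figura, espacios):
--     blank = añadir_espacios(espacios, VACIO)
--     entradas = []
--     for p in posiciones:
--         new = VACIO.copy()
--         new[p] = figura
--         entradas.append(añadir_espacios(espacios, new))
--     return [entradas[:i+1] + [blank] for i in range(len(posiciones))]
-- ===== Notes on version B (the rewrite author's own statement) =====
-- stated objective: faster
-- what changed: B precomputes each position's row once (a table of n entries plus one blank) and assembles every output row as a prefix slice of that table, instead of A's nested loop that rebuilds and re-pads every cell from scratch for each i.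
import Mathlib
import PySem

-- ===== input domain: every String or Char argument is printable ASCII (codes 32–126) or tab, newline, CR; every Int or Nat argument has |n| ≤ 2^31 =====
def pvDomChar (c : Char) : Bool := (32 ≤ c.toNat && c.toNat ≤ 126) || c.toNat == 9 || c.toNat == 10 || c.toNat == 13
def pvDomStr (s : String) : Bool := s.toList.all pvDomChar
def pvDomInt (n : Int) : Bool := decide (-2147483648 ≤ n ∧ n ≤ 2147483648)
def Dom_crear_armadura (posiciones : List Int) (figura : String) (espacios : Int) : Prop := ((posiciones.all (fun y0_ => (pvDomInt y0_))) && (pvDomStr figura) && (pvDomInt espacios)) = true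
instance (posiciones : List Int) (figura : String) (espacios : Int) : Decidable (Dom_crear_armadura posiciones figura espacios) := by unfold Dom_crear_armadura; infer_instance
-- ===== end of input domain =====

-- B precomputes each position's padded row once and assembles output rows as prefix slices
-- of that table, instead of A's nested loop rebuilding every cell (objective: faster by a
-- constant factor; the nested per-cell reconstruction disappears).

-- ===== PORT A =====
def pvVACIO : List String := ["-", " ", "-", " ", "-", " ", "-", " ", "-"]

def añadir_espacios (espacios : Int) (basico : List String) : List String :=
  List.replicate espacios.toNat " " ++ basico ++ List.replicate espacios.toNat " "

def crear_armadura (posiciones : List Int) (figura : String) (espacios : Int) : List (List (List String)) :=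
  (List.range posiciones.length).foldl
    (fun armaduras i =>
      let armadura :=
        (List.range (i + 1)).foldl
          (fun armadura (j : Nat) =>
            let new := PySem.List.pySetD pvVACIO (PySem.List.pyGetD posiciones (j : Int) 0) figura
            armadura ++ [añadir_espacios espacios new])
          []
      armaduras ++ [armadura ++ [añadir_espacios espacios pvVACIO]])
    []

-- ===== PORT B =====
def crear_armadura_alt (posiciones : List Int) (figura : String) (espacios : Int) : List (List (List String)) :=
  let blank := añadir_espacios espacios pvVACIO
  let entradas := posiciones.map (fun p => añadir_espacios espacios (PySem.List.pySetD pvVACIO p figura))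
  (List.range posiciones.length).map (fun i => entradas.take (i + 1) ++ [blank])

-- ===== PRECONDITION & SPEC =====
-- Pre_ excludes exactly the inputs where A raises IndexError: a position outside [-9, 8]
-- makes `new[posiciones[j]] = figura` raise (VACIO has 9 cells).
def Pre_crear_armadura (posiciones : List Int) (figura : String) (espacios : Int) : Prop :=
  ∀ p ∈ posiciones, PySem.Raise.InRange 9 p

instance (posiciones : List Int) (figura : String) (espacios : Int) : Decidable (Pre_crear_armadura posiciones figura espacios) := by
  unfold Pre_crear_armadura; infer_instance

def pvWitness_crear_armadura : List Int × String × Int := ([0, -1, 4], "#", 1)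

def Spec_crear_armadura (posiciones : List Int) (figura : String) (espacios : Int) (out : List (List (List String))) : Prop := out = crear_armadura_alt posiciones figura espacios
instance (posiciones : List Int) (figura : String) (espacios : Int) (out : List (List (List String))) : Decidable (Spec_crear_armadura posiciones figura espacios out) := by unfold Spec_crear_armadura; infer_instance

-- ===== CLAIM (what is proved, stated in full; the proofs are below) =====
def Claim_equal_crear_armadura : Prop := ∀ (posiciones : List Int) (figura : String) (espacios : Int), Dom_crear_armadura posiciones figura espacios → Pre_crear_armadura posiciones figura espacios → Spec_crear_armadura posiciones figura espacios (crear_armadura posiciones figura espacios)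

-- ===== LEMMAS AND PROOFS =====

-- Appending-singleton foldl over a range is a map.
theorem pv_foldl_range_append {α : Type} (f : Nat → α) (n : Nat) :
    (List.range n).foldl (fun acc j => acc ++ [f j]) [] = (List.range n).map f := by
  have h : ∀ (l : List Nat) (acc : List α),
      l.foldl (fun acc j => acc ++ [f j]) acc = acc ++ l.map f := by
    intro l
    induction l with
    | nil => intro acc; simp
    | cons x xs ih => intro acc; simp [List.foldl, ih, List.append_assoc]
  simpa using h (List.range n) []

-- Mapping g over the first i+1 indexed defaults equals taking i+1 of the mapped list.
theorem pv_range_map_getD_eq_take {α β : Type} [Inhabited α] (g : α → β) (xs : List α) (d : α)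
    (m : Nat) (hm : m ≤ xs.length) :
    (List.range m).map (fun j => g (xs.getD j d)) = (xs.map g).take m := by
  apply List.ext_getElem
  · simp [hm]
  · intro k hk1 hk2
    simp only [List.getElem_map, List.getElem_range, List.getElem_take]
    have hk : k < xs.length := lt_of_lt_of_le (by simpa using hk1) hm
    simp [List.getD, hk]

theorem crear_armadura_eq_alt (posiciones : List Int) (figura : String) (espacios : Int) :
    crear_armadura posiciones figura espacios = crear_armadura_alt posiciones figura espacios := by
  show
    (List.range posiciones.length).foldl
      (fun armaduras i =>
        armaduras ++
          [((List.range (i + 1)).foldl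
              (fun armadura (j : Nat) =>
                armadura ++ [añadir_espacios espacios
                  (PySem.List.pySetD pvVACIO (PySem.List.pyGetD posiciones (j : Int) 0) figura)]) [])
            ++ [añadir_espacios espacios pvVACIO]]) []
    = (List.range posiciones.length).map
        (fun i =>
          ((posiciones.map (fun p => añadir_espacios espacios (PySem.List.pySetD pvVACIO p figura))).take (i + 1))
            ++ [añadir_espacios espacios pvVACIO])
  rw [pv_foldl_range_append
    (f := fun i => ((List.range (i + 1)).foldl
      (fun armadura (j : Nat) =>
        armadura ++ [añadir_espacios espacios
          (PySem.List.pySetD pvVACIO (PySem.List.pyGetD posiciones (j : Int) 0) figura)]) [])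
      ++ [añadir_espacios espacios pvVACIO])]
  apply List.map_congr_left
  intro i hi
  rw [pv_foldl_range_append
    (f := fun j : Nat => añadir_espacios espacios
      (PySem.List.pySetD pvVACIO (PySem.List.pyGetD posiciones (j : Int) 0) figura))]
  have hi' : i + 1 ≤ posiciones.length := by
    have := List.mem_range.mp hi; omega
  have htake := pv_range_map_getD_eq_take
    (fun p => añadir_espacios espacios (PySem.List.pySetD pvVACIO p figura)) posiciones 0 (i + 1) hi'
  simp only [PySem.List.pyGetD_natCast]
  rw [htake]

-- ===== VERDICT (by name: the statement is the Claim_ definition above) =====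
theorem crear_armadura_spec : Claim_equal_crear_armadura := by
  intro posiciones figura espacios _ _
  exact crear_armadura_eq_alt posiciones figura espacios
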